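-- pv_equiv track=rewrite | github.com/ncatallo/adventofcode | 2021/4/main.py | check_col_done
-- ===== SOURCE A (Python) =====
-- def check_col_done(board_found, board_size):
--
--     for i in range(board_size):
--         done = True
--         for j in range(board_size):
--             if board_found[j*board_size + i] == False:
--                 done = False
--                 break
--
--         if done == True:
--             return i
--
--     return -1
-- ===== SOURCE B (Python) =====
-- def check_col_done(board_found, board_size):
--     # One flat pass tallying marked cells per column, then a short scan of the tally.
--     counts = [0] * board_size
--     for k in range(board_size * board_size):
--         if board_found[k] != False:
--             counts[k % board_size] += 1
--     for i in range(board_size):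
--         if counts[i] == board_size:
--             return i
--     return -1
-- ===== Notes on version B (the rewrite author's own statement) =====
-- stated objective: alternative
-- what changed: Replaces A's per-column nested scan with early break by a single flat pass over all board_size^2 cells building a per-column tally, followed by a separate scan of the tally for the first full column.
-- outside the precondition, e.g. on check_col_done([False, False], 2): A returns -1, B raises IndexError; on check_col_done([], -1): A returns -1, B raises IndexError
import Mathlib
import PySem

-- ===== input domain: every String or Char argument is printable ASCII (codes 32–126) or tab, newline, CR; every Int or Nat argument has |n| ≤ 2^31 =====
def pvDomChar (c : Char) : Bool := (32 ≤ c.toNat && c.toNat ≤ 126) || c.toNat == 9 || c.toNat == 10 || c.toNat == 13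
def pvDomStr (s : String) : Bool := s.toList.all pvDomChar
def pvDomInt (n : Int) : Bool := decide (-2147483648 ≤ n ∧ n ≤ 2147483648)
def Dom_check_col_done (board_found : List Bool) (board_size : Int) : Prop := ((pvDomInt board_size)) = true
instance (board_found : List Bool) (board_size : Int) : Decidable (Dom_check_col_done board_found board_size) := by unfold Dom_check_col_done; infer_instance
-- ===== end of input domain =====

-- B differs from A only in what it changes structurally (flat tally pass + scan); return values agree on every full board (Pre_).

-- ===== PORT A =====
-- inner 'for j in range(board_size)' with early break: returns the final value of 'done'
def pvAInner (bf : List Bool) (bs i : Int) : List Int → Bool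
  | [] => true
  | j :: rest =>
    if PySem.List.pyGetD bf (j * bs + i) false == false then false
    else pvAInner bf bs i rest

-- outer 'for i in range(board_size)' with early return
def pvAOuter (bf : List Bool) (bs : Int) : List Int → Int
  | [] => -1
  | i :: rest =>
    if pvAInner bf bs i (PySem.List.pyRange 0 bs 1) == true then i
    else pvAOuter bf bs rest

def check_col_done (board_found : List Bool) (board_size : Int) : Int :=
  pvAOuter board_found board_size (PySem.List.pyRange 0 board_size 1)

-- ===== PORT B =====
-- flat pass: for k in range(bs*bs): if board_found[k] != False: counts[k % bs] += 1
-- (under Pre_ bs ≥ 0, so k % bs is a nonnegative index; List.set at its toNat is exact)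
def pvBPass (bf : List Bool) (bs : Int) : List Int → List Int → List Int
  | counts, [] => counts
  | counts, k :: rest =>
    pvBPass bf bs
      (if PySem.List.pyGetD bf k false != false then
        counts.set (PySem.Int.mod k bs).toNat
          (counts.getD (PySem.Int.mod k bs).toNat 0 + 1)
       else counts) rest

-- final scan: for i in range(bs): if counts[i] == bs: return i
def pvBScan (bs : Int) (counts : List Int) : List Int → Int
  | [] => -1
  | i :: rest => if counts.getD i.toNat 0 == bs then i else pvBScan bs counts rest

def check_col_done_alt (board_found : List Bool) (board_size : Int) : Int :=
  pvBScan board_size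
    (pvBPass board_found board_size (List.replicate board_size.toNat 0)
      (PySem.List.pyRange 0 (board_size * board_size) 1))
    (PySem.List.pyRange 0 board_size 1)

-- ===== PRECONDITION & SPEC =====
-- Pre_ restricts to the natural domain of a full bingo board: board_size ≥ 0 and at least
-- board_size^2 cells.  Outside it A indexes out of range and raises on most inputs; on the
-- remaining ones (negative board_size, or a short all-False board whose early breaks dodge
-- the bad index) A happens to return -1 while B's flat pass naturally raises IndexError.
def Pre_check_col_done (board_found : List Bool) (board_size : Int) : Prop :=
  0 ≤ board_size ∧ board_size * board_size ≤ (board_found.length : Int)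
instance (board_found : List Bool) (board_size : Int) : Decidable (Pre_check_col_done board_found board_size) := by unfold Pre_check_col_done; infer_instance

def pvWitness_check_col_done : List Bool × Int := ([true, false, true, true], 2)

def Spec_check_col_done (board_found : List Bool) (board_size : Int) (out : Int) : Prop := out = check_col_done_alt board_found board_size
instance (board_found : List Bool) (board_size : Int) (out : Int) : Decidable (Spec_check_col_done board_found board_size out) := by unfold Spec_check_col_done; infer_instance

-- ===== CLAIM (what is proved, stated in full; the proofs are below) =====
def Claim_equal_check_col_done : Prop := ∀ (board_found : List Bool) (board_size : Int), Dom_check_col_done board_found board_size → Pre_check_col_done board_found board_size → Spec_check_col_done board_found board_size (check_col_done board_found board_size)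

-- ===== LEMMAS AND PROOFS =====

theorem pvGetD_set_int (l : List Int) (i t : Nat) (v : Int) :
    (l.set i v).getD t 0 = if i = t ∧ i < l.length then v else l.getD t 0 := by
  simp [List.getD, List.getElem?_set]
  split_ifs <;> simp_all <;> omega

theorem pvBPass_getD (bf : List Bool) (n : Nat) (hn : 0 < n) (t : Nat) (ht : t < n) :
    ∀ (ks counts : List Int), counts.length = n →
    (pvBPass bf (n : Int) counts ks).getD t 0
      = counts.getD t 0
        + (ks.countP (fun k =>
            ((PySem.Int.mod k (n : Int)).toNat == t) && PySem.List.pyGetD bf k false) : Int) := by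
  intro ks
  induction ks with
  | nil => intro counts _; simp [pvBPass]
  | cons k rest ih =>
    intro counts hlen
    have hnz : (0 : Int) < (n : Int) := by exact_mod_cast hn
    have hmlt : PySem.Int.mod k (n : Int) < (n : Int) := PySem.Int.mod_lt _ hnz
    have hmnn : 0 ≤ PySem.Int.mod k (n : Int) := PySem.Int.mod_nonneg _ hnz
    have hidx : (PySem.Int.mod k (n : Int)).toNat < n := by omega
    simp only [pvBPass, List.countP_cons]
    by_cases hc : PySem.List.pyGetD bf k false = true
    · rw [if_pos (by simp [hc])]
      rw [ih _ (by rw [List.length_set]; exact hlen)]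
      rw [pvGetD_set_int]
      by_cases hit : (PySem.Int.mod k (n : Int)).toNat = t
      · rw [if_pos ⟨hit, by omega⟩]
        simp [hit, hc]
        ring
      · rw [if_neg (by intro h; exact hit h.1)]
        simp [hit, hc]
    · rw [if_neg (by simp [hc])]
      rw [ih _ hlen]
      simp only [Bool.not_eq_true] at hc
      simp [hc]

theorem pvCountP_range_single (n t : Nat) (q : Nat → Bool) (ht : t < n) :
    (List.range n).countP (fun i => (i == t) && q i) = if q t then 1 else 0 := by
  induction n with
  | zero => omega
  | succ n ih =>
    rw [List.range_succ, List.countP_append]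
    by_cases h : t < n
    · rw [ih h]
      have : ((n == t) && q n) = false := by simp; intro h'; omega
      simp [this]
    · have htn : t = n := by omega
      subst htn
      have hz : (List.range t).countP (fun i => (i == t) && q i) = 0 := by
        rw [List.countP_eq_zero]
        intro i hi
        simp only [List.mem_range] at hi
        simp
        intro h'; omega
      rw [hz]
      cases hq : q t <;> simp [hq]

theorem pvCountP_range_mul (p : Nat → Bool) (n t : Nat) (ht : t < n) :
    ∀ J : Nat, (List.range (J * n)).countP (fun k => (k % n == t) && p k)
      = (List.range J).countP (fun j => p (j * n + t)) := by
  intro J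
  induction J with
  | zero => simp
  | succ J ih =>
    have hsplit : (J + 1) * n = J * n + n := by ring
    rw [hsplit, List.range_add, List.countP_append, ih, List.range_succ, List.countP_append]
    congr 1
    rw [List.countP_map]
    have hcong : ∀ i ∈ List.range n,
        ((fun k => (k % n == t) && p k) ∘ (fun x => J * n + x)) i
          = ((i == t) && p (J * n + i)) := by
      intro i hi
      simp only [List.mem_range] at hi
      simp only [Function.comp]
      have : (J * n + i) % n = i := by
        rw [Nat.add_comm, Nat.mul_comm J n, Nat.add_mul_mod_self_left, Nat.mod_eq_of_lt hi]
      rw [this]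
    rw [List.countP_congr (fun a ha => by rw [hcong a ha])]
    rw [pvCountP_range_single n t _ ht]
    cases hq : p (J * n + t) <;> simp [hq]

theorem pvAInner_eq_all (bf : List Bool) (bs i : Int) :
    ∀ js, pvAInner bf bs i js = js.all (fun j => PySem.List.pyGetD bf (j * bs + i) false) := by
  intro js
  induction js with
  | nil => rfl
  | cons j rest ih =>
    simp only [pvAInner, List.all_cons, ih]
    cases h : PySem.List.pyGetD bf (j * bs + i) false <;> simp

theorem pvScan_eq (bf : List Bool) (bs : Int) (counts : List Int) :
    ∀ js, (∀ i ∈ js,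
        ((pvAInner bf bs i (PySem.List.pyRange 0 bs 1) = true) ↔ (counts.getD i.toNat 0 = bs))) →
    pvAOuter bf bs js = pvBScan bs counts js := by
  intro js
  induction js with
  | nil => intro _; rfl
  | cons i rest ih =>
    intro h
    have hi := h i (by simp)
    simp only [pvAOuter, pvBScan]
    by_cases hA : pvAInner bf bs i (PySem.List.pyRange 0 bs 1) = true
    · rw [if_pos (by simp only [beq_iff_eq]; exact hA),
          if_pos (by simp only [beq_iff_eq]; exact hi.mp hA)]
    · have hB : ¬ (counts.getD i.toNat 0 = bs) := fun hc => hA (hi.mpr hc)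
      rw [if_neg (by simp only [beq_iff_eq]; exact hA),
          if_neg (by simp only [beq_iff_eq]; exact hB)]
      exact ih (fun x hx => h x (by simp [hx]))

-- ===== VERDICT (by name: the statement is the Claim_ definition above) =====
theorem check_col_done_spec : Claim_equal_check_col_done := by
  intro bf bs _ hpre
  obtain ⟨hbs, hlen⟩ := hpre
  unfold Spec_check_col_done check_col_done check_col_done_alt
  obtain ⟨n, rfl⟩ : ∃ n : Nat, bs = (n : Int) := ⟨bs.toNat, (Int.toNat_of_nonneg hbs).symm⟩
  rcases Nat.eq_zero_or_pos n with h0 | hn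
  · subst h0
    simp [PySem.List.pyRange_one_eq_nil (le_refl (0 : Int)), pvAOuter, pvBScan]
  · apply pvScan_eq
    intro i hi
    rw [PySem.List.mem_pyRange_one] at hi
    obtain ⟨t, rfl⟩ : ∃ t : Nat, i = (t : Int) := ⟨i.toNat, (Int.toNat_of_nonneg hi.1).symm⟩
    have htn : t < n := by exact_mod_cast hi.2
    -- B side: the tallied count for column t
    simp only [Int.toNat_natCast]
    rw [pvBPass_getD bf n hn t (by omega) _ _ (by simp)]
    have hrep : (List.replicate n (0 : Int)).getD t 0 = 0 := by
      simp [List.getD, htn]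
    rw [hrep]
    have hNN : (n : Int) * (n : Int) = ((n * n : Nat) : Int) := by push_cast; ring
    rw [hNN, PySem.List.pyRange_zero_natCast (n * n), List.countP_map]
    have hpred : ∀ k ∈ List.range (n * n),
        (((PySem.Int.mod (k : Int) (n : Int)).toNat == t) && PySem.List.pyGetD bf (k : Int) false)
          = ((k % n == t) && bf.getD k false) := by
      intro k _
      rw [PySem.Int.mod_natCast k n, PySem.List.pyGetD_natCast bf k false, Int.toNat_natCast]
    simp only [Function.comp_def]
    rw [List.countP_congr (fun a ha => by rw [hpred a ha])]
    rw [pvCountP_range_mul (fun k => bf.getD k false) n t htn n]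
    -- A side: the column-t inner loop
    rw [pvAInner_eq_all, PySem.List.pyRange_zero_natCast n, List.all_map]
    simp only [Function.comp_def]
    have hpredA : ∀ j ∈ List.range n,
        PySem.List.pyGetD bf ((j : Int) * (n : Int) + (t : Int)) false
          = bf.getD (j * n + t) false := by
      intro j _
      have hx : ((j : Int)) * (n : Int) + (t : Int) = ((j * n + t : Nat) : Int) := by
        push_cast; ring
      rw [hx]
      exact PySem.List.pyGetD_natCast bf (j * n + t) false
    constructor
    · intro hall
      rw [List.all_eq_true] at hall
      have : (List.range n).countP (fun j => bf.getD (j * n + t) false) = n := by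
        have hcl := List.countP_eq_length (l := List.range n)
          (p := fun j => bf.getD (j * n + t) false)
        rw [List.length_range] at hcl
        exact hcl.mpr (fun j hj => by rw [← hpredA j hj]; exact hall j hj)
      rw [this]; omega
    · intro hcnt
      have hc : (List.range n).countP (fun j => bf.getD (j * n + t) false) = n := by omega
      rw [List.all_eq_true]
      intro j hj
      rw [hpredA j hj]
      have hcl := List.countP_eq_length (l := List.range n)
        (p := fun j => bf.getD (j * n + t) false)
      rw [List.length_range] at hcl
      exact hcl.mp hc j hj
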